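-- pv_equiv track=rewrite | github.com/Illya-Kryushenko/architecture-as-code | aac/validator.py | evaluate_control_status
-- ===== SOURCE A (Python) =====
-- MAPPING_PASS = "PASS"
--
-- MAPPING_FAIL = "FAIL"
--
-- MAPPING_MISSING = "MISSING"
--
-- CONTROL_COVERED = "COVERED"
--
-- CONTROL_FAILED = "FAILED"
--
-- CONTROL_INCOMPLETE = "INCOMPLETE"
--
-- CONTROL_MISSING = "MISSING"
--
-- def evaluate_control_status(results):
--     """
--     Derives control status from mapping-level results.
--     """
--     if results and all(result == MAPPING_PASS for result in results):
--         return CONTROL_COVERED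
--
--     if MAPPING_FAIL in results:
--         return CONTROL_FAILED
--
--     if MAPPING_PASS in results and MAPPING_MISSING in results:
--         return CONTROL_INCOMPLETE
--
--     if results and all(result == MAPPING_MISSING for result in results):
--         return CONTROL_MISSING
--
--     return CONTROL_MISSING
-- ===== SOURCE B (Python) =====
-- MAPPING_PASS = "PASS"
-- MAPPING_FAIL = "FAIL"
-- MAPPING_MISSING = "MISSING"
-- CONTROL_COVERED = "COVERED"
-- CONTROL_FAILED = "FAILED"
-- CONTROL_INCOMPLETE = "INCOMPLETE"
-- CONTROL_MISSING = "MISSING"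
--
-- def evaluate_control_status(results):
--     seen = has_pass = has_fail = has_missing = has_other = False
--     for r in results:
--         seen = True
--         if r == MAPPING_PASS:
--             has_pass = True
--         elif r == MAPPING_FAIL:
--             has_fail = True
--         elif r == MAPPING_MISSING:
--             has_missing = True
--         else:
--             has_other = True
--     if seen and has_pass and not (has_fail or has_missing or has_other):
--         return CONTROL_COVERED
--     if has_fail:
--         return CONTROL_FAILED
--     if has_pass and has_missing:
--         return CONTROL_INCOMPLETE
--     return CONTROL_MISSING
-- ===== Notes on version B (the rewrite author's own statement) =====
-- stated objective: alternative
-- what changed: Replaced A's four separate scans of results (all-PASS, FAIL membership, PASS+MISSING membership, all-MISSING) by a single pass that accumulates boolean flags (seen/has_pass/has_fail/has_missing/has_other) and decides from the flags with the same priority.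
import Mathlib
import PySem

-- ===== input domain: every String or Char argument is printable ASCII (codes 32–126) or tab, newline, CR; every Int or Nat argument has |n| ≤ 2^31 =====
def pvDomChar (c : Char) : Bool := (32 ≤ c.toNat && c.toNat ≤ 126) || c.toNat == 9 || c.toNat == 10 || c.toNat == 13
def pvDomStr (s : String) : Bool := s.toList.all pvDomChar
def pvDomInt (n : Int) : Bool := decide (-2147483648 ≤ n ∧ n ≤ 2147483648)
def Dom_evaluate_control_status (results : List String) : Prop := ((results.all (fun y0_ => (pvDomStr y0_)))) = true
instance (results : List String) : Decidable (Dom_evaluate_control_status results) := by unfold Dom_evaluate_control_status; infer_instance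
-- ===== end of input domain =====

-- B replaces A's four separate scans of `results` by one aggregation pass over
-- boolean flags; same decision priority, same value everywhere (objective: alternative).

-- ===== PORT A =====
def evaluate_control_status (results : List String) : String :=
  if results ≠ [] ∧ results.all (fun result => result == "PASS") then "COVERED"
  else if results.contains "FAIL" then "FAILED"
  else if results.contains "PASS" ∧ results.contains "MISSING" then "INCOMPLETE"
  else if results ≠ [] ∧ results.all (fun result => result == "MISSING") then "MISSING"
  else "MISSING"

-- ===== PORT B =====
-- The loop state (seen, has_pass, has_fail, has_missing, has_other), folded once.
def evalStatusStep (s : Bool × Bool × Bool × Bool × Bool) (r : String) :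
    Bool × Bool × Bool × Bool × Bool :=
  if r == "PASS" then (true, true, s.2.2.1, s.2.2.2.1, s.2.2.2.2)
  else if r == "FAIL" then (true, s.2.1, true, s.2.2.2.1, s.2.2.2.2)
  else if r == "MISSING" then (true, s.2.1, s.2.2.1, true, s.2.2.2.2)
  else (true, s.2.1, s.2.2.1, s.2.2.2.1, true)

def evaluate_control_status_alt (results : List String) : String :=
  let s := results.foldl evalStatusStep (false, false, false, false, false)
  if s.1 && s.2.1 && !(s.2.2.1 || s.2.2.2.1 || s.2.2.2.2) then "COVERED"
  else if s.2.2.1 then "FAILED"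
  else if s.2.1 && s.2.2.2.1 then "INCOMPLETE"
  else "MISSING"

-- ===== PRECONDITION & SPEC =====
def Spec_evaluate_control_status (results : List String) (out : String) : Prop := out = evaluate_control_status_alt results
instance (results : List String) (out : String) : Decidable (Spec_evaluate_control_status results out) := by unfold Spec_evaluate_control_status; infer_instance

-- ===== CLAIM (what is proved, stated in full; the proofs are below) =====
def Claim_equal_evaluate_control_status : Prop := ∀ (results : List String), Dom_evaluate_control_status results → Spec_evaluate_control_status results (evaluate_control_status results)

-- ===== LEMMAS AND PROOFS =====

-- The fold computes exactly these scans of the list.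
theorem evalStatus_fold_eq (results : List String) (s : Bool × Bool × Bool × Bool × Bool) :
    results.foldl evalStatusStep s =
      (s.1 || !results.isEmpty,
       s.2.1 || results.contains "PASS",
       s.2.2.1 || results.contains "FAIL",
       s.2.2.2.1 || results.contains "MISSING",
       s.2.2.2.2 || results.any (fun r => !(r == "PASS") && !(r == "FAIL") && !(r == "MISSING"))) := by
  induction results generalizing s with
  | nil => simp
  | cons r rs ih =>
    rw [List.foldl_cons, ih]
    by_cases h1 : r = "PASS" <;> by_cases h2 : r = "FAIL" <;> by_cases h3 : r = "MISSING" <;>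
      simp [evalStatusStep, h1, h2, h3, @eq_comm String, List.any_cons, List.isEmpty_cons,
        Bool.or_comm]

theorem evaluate_control_status_spec : Claim_equal_evaluate_control_status := by
  intro results _
  show evaluate_control_status results = evaluate_control_status_alt results
  unfold evaluate_control_status evaluate_control_status_alt
  simp only [evalStatus_fold_eq, Bool.false_or]
  by_cases hP : "PASS" ∈ results <;> by_cases hF : "FAIL" ∈ results <;>
    by_cases hM : "MISSING" ∈ results <;>
    by_cases hO : results.any (fun r => !(r == "PASS") && !(r == "FAIL") && !(r == "MISSING")) = true <;>
    by_cases hE : results = [] <;>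
    simp_all [List.all_eq_true, List.any_eq_true] <;>
    first
    | exact ⟨"FAIL", hF, by decide⟩
    | exact ⟨"MISSING", hM, by decide⟩
    | (obtain ⟨x, hx, hxo⟩ := hO
       exact ⟨x, hx, hxo.1.1⟩)
    | (obtain ⟨x, hx, hxo⟩ := hO
       rw [if_neg (fun hall => hxo.1.1 (hall x hx)),
           if_neg (fun hall => hxo.2 (hall x hx hxo.1.1 hxo.1.2))])
    | (have hall : ∀ x ∈ results, x = "PASS" := by
         intro x hx
         by_contra hp
         have hf : ¬x = "FAIL" := fun h => hF (h ▸ hx)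
         exact hM ((hO x hx hp hf) ▸ hx)
       first
       | rw [if_pos hall, if_pos (fun x hx hp _ => absurd (hall x hx) hp)]
       | (obtain ⟨x, hx⟩ := List.exists_mem_of_ne_nil results hE
          exact absurd (hall x hx ▸ hx) hP))

-- ===== VERDICT (by name: the statement is the Claim_ definition above) =====
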